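-- pv_equiv track=rewrite | github.com/sahilvas/db-case-study | bin/demo_script.py | check_keywords_in_page
-- ===== SOURCE A (Python) =====
-- from collections import Counter
--
-- def check_keywords_in_page(content, keyword_sets):
--     """Checks for individual keywords on a given page."""
--     content = content.lower()
--     keyword_set_counts = Counter()
--
--     for keyword_set in keyword_sets:
--         for keyword in keyword_set:
--             keyword_lower = keyword.lower()
--             if keyword_lower in content:
--                 keyword_set_counts[tuple(keyword_set)] += 1
--
--     return keyword_set_counts
-- ===== SOURCE B (Python) =====
-- from collections import Counter
--
-- def check_keywords_in_page(content, keyword_sets):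
--     """Checks for individual keywords on a given page."""
--     text = content.lower()
--     # Stage 1: a match table, so each distinct lowered keyword is searched
--     # for in the page at most once, no matter how often it recurs.
--     match = {}
--     for keyword_set in keyword_sets:
--         for keyword in keyword_set:
--             k = keyword.lower()
--             if k not in match:
--                 match[k] = k in text
--     # Stage 2: per-set counts by table lookup only; one Counter update per set.
--     counts = Counter()
--     for keyword_set in keyword_sets:
--         n = sum(match[keyword.lower()] for keyword in keyword_set)
--         if n:
--             counts[tuple(keyword_set)] += n
--     return counts
-- ===== Notes on version B (the rewrite author's own statement) =====
-- stated objective: alternative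
-- what changed: B replaces A's single nested scan-and-increment loop by two staged passes: it first builds a memo table mapping each distinct lowered keyword to the result of one substring search, then counts each set's matches purely by table lookup with a single Counter update per set, so repeated keywords are never searched for in the page twice.
import Mathlib
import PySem

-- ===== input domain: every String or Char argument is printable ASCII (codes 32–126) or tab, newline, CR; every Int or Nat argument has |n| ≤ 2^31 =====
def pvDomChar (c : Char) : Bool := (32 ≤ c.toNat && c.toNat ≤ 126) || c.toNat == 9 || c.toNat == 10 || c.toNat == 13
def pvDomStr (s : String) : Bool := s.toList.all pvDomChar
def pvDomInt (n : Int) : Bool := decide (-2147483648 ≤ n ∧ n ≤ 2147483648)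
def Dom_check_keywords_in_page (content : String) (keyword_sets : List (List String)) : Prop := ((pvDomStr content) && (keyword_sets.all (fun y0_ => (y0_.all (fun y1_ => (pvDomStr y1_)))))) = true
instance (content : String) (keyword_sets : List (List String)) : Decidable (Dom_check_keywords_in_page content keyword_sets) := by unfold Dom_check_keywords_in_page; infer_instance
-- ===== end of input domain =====

-- B replaces A's nested scan-and-increment by two staged passes over a memo table of
-- per-distinct-keyword substring-search results (objective: alternative).

-- ===== PORT A =====
def check_keywords_in_page (content : String) (keyword_sets : List (List String)) : List (List String × Int) :=
  let text := PySem.Str.lower content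
  (keyword_sets.foldl (fun d keyword_set =>
      keyword_set.foldl (fun d keyword =>
        let keyword_lower := PySem.Str.lower keyword
        if PySem.Str.isIn keyword_lower text then d.modify keyword_set 0 (· + 1) else d) d)
    PySem.Dict.empty).items

-- ===== PORT B =====
def check_keywords_in_page_alt (content : String) (keyword_sets : List (List String)) : List (List String × Int) :=
  let text := PySem.Str.lower content
  -- stage 1: match table, one substring search per distinct lowered keyword
  let mtab : PySem.Dict String Bool := keyword_sets.foldl (fun m keyword_set =>
      keyword_set.foldl (fun m keyword =>
        let k := PySem.Str.lower keyword
        if m.contains k then m else m.insert k (PySem.Str.isIn k text)) m)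
    PySem.Dict.empty
  -- stage 2: per-set counts by table lookup; one Counter update per set
  (keyword_sets.foldl (fun d keyword_set =>
      let n : Int := (keyword_set.map (fun keyword =>
        if mtab.getD (PySem.Str.lower keyword) false then (1 : Int) else 0)).sum
      if n ≠ 0 then d.modify keyword_set 0 (· + n) else d)
    PySem.Dict.empty).items

-- ===== PRECONDITION & SPEC =====
def Spec_check_keywords_in_page (content : String) (keyword_sets : List (List String)) (out : List (List String × Int)) : Prop := out = check_keywords_in_page_alt content keyword_sets
instance (content : String) (keyword_sets : List (List String)) (out : List (List String × Int)) : Decidable (Spec_check_keywords_in_page content keyword_sets out) := by unfold Spec_check_keywords_in_page; infer_instance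

-- ===== CLAIM (what is proved, stated in full; the proofs are below) =====
def Claim_equal_check_keywords_in_page : Prop := ∀ (content : String) (keyword_sets : List (List String)), Dom_check_keywords_in_page content keyword_sets → Spec_check_keywords_in_page content keyword_sets (check_keywords_in_page content keyword_sets)

-- ===== LEMMAS AND PROOFS =====

-- The stage-1 table only ever stores the substring-test result of its key.
theorem mtab_sound (text : String) (kss : List (List String)) (m : PySem.Dict String Bool)
    (hm : ∀ k b, m.get? k = some b → b = PySem.Str.isIn k text) :
    ∀ k b, (kss.foldl (fun m ks =>
        ks.foldl (fun m kw =>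
          let k := PySem.Str.lower kw
          if m.contains k then m else m.insert k (PySem.Str.isIn k text)) m) m).get? k = some b →
      b = PySem.Str.isIn k text := by
  induction kss generalizing m with
  | nil => exact hm
  | cons ks kss ih =>
    simp only [List.foldl_cons]
    refine ih _ ?_
    clear ih
    induction ks generalizing m with
    | nil => exact hm
    | cons kw ks ih =>
      simp only [List.foldl_cons]
      refine ih _ ?_
      intro k b hb
      simp only at hb
      by_cases hc : m.contains (PySem.Str.lower kw) = true
      · exact hm k b (by simpa [hc] using hb)
      · simp only [hc, if_neg, Bool.false_eq_true, not_false_iff] at hb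
        rw [PySem.Dict.get?_insert] at hb
        by_cases hk : k = PySem.Str.lower kw
        · rw [if_pos hk] at hb
          rw [hk]
          exact (Option.some_inj.mp hb).symm
        · exact hm k b (by rwa [if_neg hk] at hb)

-- After stage 1, every keyword of every set has an entry.
theorem mtab_covers (text : String) (kss : List (List String)) (m : PySem.Dict String Bool) :
    ∀ ks ∈ kss, ∀ kw ∈ ks, (kss.foldl (fun m ks =>
        ks.foldl (fun m kw =>
          let k := PySem.Str.lower kw
          if m.contains k then m else m.insert k (PySem.Str.isIn k text)) m) m).contains (PySem.Str.lower kw) = true := by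
  -- monotonicity of the folds w.r.t. contains
  have mono1 : ∀ (ks : List String) (m : PySem.Dict String Bool) (k : String), m.contains k = true →
      (ks.foldl (fun m kw =>
        let k := PySem.Str.lower kw
        if m.contains k then m else m.insert k (PySem.Str.isIn k text)) m).contains k = true := by
    intro ks
    induction ks with
    | nil => intro m k h; exact h
    | cons kw ks ih =>
      intro m k h
      simp only [List.foldl_cons]
      refine ih _ _ ?_
      by_cases hc : m.contains (PySem.Str.lower kw) = true
      · simpa [hc] using h
      · simp only [hc, if_neg, Bool.false_eq_true, not_false_iff]
        rw [PySem.Dict.contains_insert, h]; simp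
  have mono : ∀ (kss : List (List String)) (m : PySem.Dict String Bool) (k : String), m.contains k = true →
      (kss.foldl (fun m ks =>
        ks.foldl (fun m kw =>
          let k := PySem.Str.lower kw
          if m.contains k then m else m.insert k (PySem.Str.isIn k text)) m) m).contains k = true := by
    intro kss
    induction kss with
    | nil => intro m k h; exact h
    | cons ks kss ih =>
      intro m k h
      simp only [List.foldl_cons]
      exact ih _ _ (mono1 ks m k h)
  have inner : ∀ (ks : List String) (m : PySem.Dict String Bool), ∀ kw ∈ ks,
      (ks.foldl (fun m kw =>
        let k := PySem.Str.lower kw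
        if m.contains k then m else m.insert k (PySem.Str.isIn k text)) m).contains (PySem.Str.lower kw) = true := by
    intro ks
    induction ks with
    | nil => intro m kw h; cases h
    | cons kw0 ks ih =>
      intro m kw hmem
      simp only [List.foldl_cons]
      rcases List.mem_cons.mp hmem with h | h
      · subst h
        by_cases hc : m.contains (PySem.Str.lower kw) = true
        · simpa [hc] using mono1 ks _ _ hc
        · refine mono1 ks _ _ ?_
          simp only [hc, if_neg, Bool.false_eq_true, not_false_iff]
          exact PySem.Dict.contains_insert_self _ _ _
      · exact ih _ kw h
  induction kss generalizing m with
  | nil => intro ks h; cases h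
  | cons ks0 kss ih =>
    intro ks hks kw hkw
    simp only [List.foldl_cons]
    rcases List.mem_cons.mp hks with h | h
    · subst h
      exact mono kss _ _ (inner ks m kw hkw)
    · exact ih _ ks h kw hkw

-- A's inner loop over one set equals B's single conditional Counter update (count form).
theorem inner_loop_eq (p : String → Bool) (ks key : List String)
    (d : PySem.Dict (List String) Int) :
    ks.foldl (fun d kw => if p kw then d.modify key 0 (· + 1) else d) d
      = (if (ks.countP p : Int) ≠ 0 then d.modify key 0 (· + (ks.countP p : Int)) else d) := by
  induction ks generalizing d with
  | nil => simp
  | cons kw ks ih =>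
    have hmod : ∀ (d : PySem.Dict (List String) Int) (n : Int),
        d.modify key 0 (· + n) = d.insert key (d.getD key 0 + n) := fun _ _ => rfl
    by_cases h : p kw
    · simp only [List.foldl_cons, List.countP_cons, h, if_true, ih]
      have hne : ((ks.countP p + 1 : Nat) : Int) ≠ 0 := by positivity
      rw [if_pos hne]
      by_cases hc : (ks.countP p : Int) = 0
      · rw [if_neg (not_not_intro hc), hmod, hmod]
        congr 1
        omega
      · rw [if_pos hc]
        simp only [hmod, PySem.Dict.getD_insert_self, PySem.Dict.insert_insert_self]
        congr 1
        push_cast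
        ring
    · rw [List.foldl_cons, if_neg h, ih]
      simp only [List.countP_cons, if_neg h, add_zero]


-- ===== VERDICT (by name: the statement is the Claim_ definition above) =====
theorem check_keywords_in_page_spec : Claim_equal_check_keywords_in_page := by
  intro content keyword_sets _
  unfold Spec_check_keywords_in_page check_keywords_in_page check_keywords_in_page_alt
  simp only
  set text := PySem.Str.lower content with htext
  set mtab : PySem.Dict String Bool := keyword_sets.foldl (fun m keyword_set =>
      keyword_set.foldl (fun m keyword =>
        let k := PySem.Str.lower keyword
        if m.contains k then m else m.insert k (PySem.Str.isIn k text)) m)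
    PySem.Dict.empty with hmtab
  congr 1
  refine PySem.List.foldl_congr_mem' _ _ _ _ ?_
  intro ks hks d
  -- on members, table lookup equals the direct substring test
  have hlook : ∀ kw ∈ ks, mtab.getD (PySem.Str.lower kw) false = PySem.Str.isIn (PySem.Str.lower kw) text := by
    intro kw hkw
    have hc : mtab.contains (PySem.Str.lower kw) = true := by
      rw [hmtab]; exact mtab_covers text keyword_sets PySem.Dict.empty ks hks kw hkw
    rw [PySem.Dict.contains_eq_isSome_get?] at hc
    obtain ⟨b, hb⟩ := Option.isSome_iff_exists.mp hc
    have hval := mtab_sound text keyword_sets PySem.Dict.empty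
      (fun k b h => by simp [PySem.Dict.get?_empty] at h) (PySem.Str.lower kw) b (by rw [hmtab] at hb; exact hb)
    rw [PySem.Dict.getD_eq_get?_getD, hb, Option.getD_some, hval]
  have hmap : ks.map (fun kw => if mtab.getD (PySem.Str.lower kw) false then (1 : Int) else 0)
      = ks.map (fun kw => if PySem.Str.isIn (PySem.Str.lower kw) text then (1 : Int) else 0) :=
    List.map_congr_left (fun kw hkw => by rw [hlook kw hkw])
  simp only [hmap, PySem.List.sum_map_ite_one_zero]
  exact inner_loop_eq (fun kw => PySem.Str.isIn (PySem.Str.lower kw) text) ks ks d
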